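-- pv_equiv track=rewrite | github.com/Mopckou/observation_processing | src/helpers.py | get_zero_intervals
-- ===== SOURCE A (Python) =====
-- def get_zero_intervals(array):
--     flag = False
--     marks = []
--     mark = {}
--     for num, val in enumerate(array):
--         if val == 0 and not flag:
--             mark = {'begin': num}
--             flag = True
--         elif val != 0 and flag:
--             mark['end'] = num
--             flag = False
--             mark['count'] = mark['end'] - mark['begin']
--             marks.append(mark)
--
--     if flag:  # если последний элемент == 1
--         mark['end'] = len(array)
--         mark['count'] = mark['end'] - mark['begin']
--         marks.append(mark)
--     return marks
-- ===== SOURCE B (Python) =====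
-- def get_zero_intervals(array):
--     # Two-pointer run scanner: for each zero run [i, j) append one interval dict.
--     res = []
--     i = 0
--     n = len(array)
--     while i < n:
--         if array[i] == 0:
--             j = i
--             while j < n and array[j] == 0:
--                 j += 1
--             res.append({'begin': i, 'end': j, 'count': j - i})
--             i = j
--         else:
--             i += 1
--     return res
-- ===== Notes on version B (the rewrite author's own statement) =====
-- stated objective: simpler
-- what changed: Replaced the flag-based state machine (with a trailing-run special case after the loop) by a two-pointer scan that consumes each whole zero run at once and appends its interval immediately.
import Mathlib
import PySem

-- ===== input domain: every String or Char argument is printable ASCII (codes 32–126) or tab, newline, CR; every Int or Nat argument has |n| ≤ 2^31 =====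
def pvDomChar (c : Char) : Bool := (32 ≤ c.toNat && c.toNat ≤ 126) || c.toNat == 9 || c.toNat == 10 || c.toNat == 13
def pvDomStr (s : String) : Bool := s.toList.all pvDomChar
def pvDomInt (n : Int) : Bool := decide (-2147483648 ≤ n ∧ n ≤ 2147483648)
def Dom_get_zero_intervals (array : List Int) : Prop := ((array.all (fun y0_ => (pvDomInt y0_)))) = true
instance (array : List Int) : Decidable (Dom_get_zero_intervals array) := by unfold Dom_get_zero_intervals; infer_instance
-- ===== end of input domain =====

-- B replaces A's flag-based state machine (with its trailing-run special case) by a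
-- two-pointer run scan that emits each zero run's interval at once; objective: simpler.

-- ===== PORT A =====
-- A's for-loop over enumerate(array): state (flag, mark, marks), num is the running index.
def gziLoop : List Int → Int → Bool → PySem.Dict String Int → List (List (String × Int)) →
    Bool × PySem.Dict String Int × List (List (String × Int))
  | [], _, flag, mark, marks => (flag, mark, marks)
  | v :: rest, num, flag, mark, marks =>
    if v = 0 ∧ flag = false then
      gziLoop rest (num + 1) true (PySem.Dict.ofList [("begin", num)]) marks
    else if v ≠ 0 ∧ flag = true then
      let mark' := (mark.insert "end" num)
      let mark'' := mark'.insert "count" (mark'.getD "end" 0 - mark'.getD "begin" 0)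
      gziLoop rest (num + 1) false mark'' (marks ++ [mark''.items])
    else
      gziLoop rest (num + 1) flag mark marks

def get_zero_intervals (array : List Int) : List (List (String × Int)) :=
  let st := gziLoop array 0 false PySem.Dict.empty []
  let flag := st.1
  let mark := st.2.1
  let marks := st.2.2
  if flag then
    let mark' := mark.insert "end" (PySem.List.len array)
    let mark'' := mark'.insert "count" (mark'.getD "end" 0 - mark'.getD "begin" 0)
    marks ++ [mark''.items]
  else
    marks

-- ===== PORT B =====
-- inner while of Source B: count the leading zeros and return the remainder of the list
def gziZrun : List Int → Nat × List Int
  | [] => (0, [])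
  | x :: xs => if x = 0 then ((gziZrun xs).1 + 1, (gziZrun xs).2) else (0, x :: xs)

theorem gziZrun_length_le (l : List Int) : (gziZrun l).2.length ≤ l.length := by
  induction l with
  | nil => simp [gziZrun]
  | cons x xs ih =>
    by_cases h : x = 0 <;> simp [gziZrun, h] <;> omega

-- outer while of Source B: i is array's current index, l the remaining suffix
def gziScan (l : List Int) (i : Int) : List (List (String × Int)) :=
  match h : l with
  | [] => []
  | x :: xs =>
    if hx : x = 0 then
      let p := gziZrun (x :: xs)
      [("begin", i), ("end", i + (p.1 : Int)), ("count", (i + (p.1 : Int)) - i)] ::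
        gziScan p.2 (i + (p.1 : Int))
    else
      gziScan xs (i + 1)
termination_by l.length
decreasing_by
  · simp only [gziZrun, if_pos hx]
    have := gziZrun_length_le xs
    simp; omega
  · simp

def get_zero_intervals_alt (array : List Int) : List (List (String × Int)) :=
  gziScan array 0

-- ===== PRECONDITION & SPEC =====
def Spec_get_zero_intervals (array : List Int) (out : List (List (String × Int))) : Prop := out = get_zero_intervals_alt array
instance (array : List Int) (out : List (List (String × Int))) : Decidable (Spec_get_zero_intervals array out) := by unfold Spec_get_zero_intervals; infer_instance

-- ===== CLAIM (what is proved, stated in full; the proofs are below) =====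
def Claim_equal_get_zero_intervals : Prop := ∀ (array : List Int), Dom_get_zero_intervals array → Spec_get_zero_intervals array (get_zero_intervals array)

-- ===== LEMMAS AND PROOFS =====

-- A's post-loop trailing-run step, as a function of the final loop state
def gziFinish (n : Int) (st : Bool × PySem.Dict String Int × List (List (String × Int))) :
    List (List (String × Int)) :=
  if st.1 then
    let mark' := st.2.1.insert "end" n
    let mark'' := mark'.insert "count" (mark'.getD "end" 0 - mark'.getD "begin" 0)
    st.2.2 ++ [mark''.items]
  else
    st.2.2

theorem gziFinish_get (array : List Int) :
    get_zero_intervals array = gziFinish (PySem.List.len array) (gziLoop array 0 false PySem.Dict.empty []) := by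
  simp [get_zero_intervals, gziFinish]

-- the singleton dict {'begin': b} after inserting 'end' and 'count' is the literal 3-item list
theorem gzi_mark_items (b n : Int) :
    (((PySem.Dict.ofList [("begin", b)]).insert "end" n).insert "count"
        ((((PySem.Dict.ofList [("begin", b)]).insert "end" n).getD "end" 0) -
         (((PySem.Dict.ofList [("begin", b)]).insert "end" n).getD "begin" 0))).items
      = [("begin", b), ("end", n), ("count", n - b)] := by
  simp [PySem.Dict.ofList, PySem.Dict.update, PySem.Dict.empty, PySem.Dict.insert,
        PySem.Dict.getD, PySem.Dict.get?, PySem.Dict.items, PySem.Dict.contains]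

-- unfold one step of A's loop on a nonempty list
theorem gziLoop_cons (v : Int) (rest : List Int) (num : Int) (flag : Bool)
    (mark : PySem.Dict String Int) (marks : List (List (String × Int))) :
    gziLoop (v :: rest) num flag mark marks =
      if v = 0 ∧ flag = false then
        gziLoop rest (num + 1) true (PySem.Dict.ofList [("begin", num)]) marks
      else if v ≠ 0 ∧ flag = true then
        let mark' := (mark.insert "end" num)
        let mark'' := mark'.insert "count" (mark'.getD "end" 0 - mark'.getD "begin" 0)
        gziLoop rest (num + 1) false mark'' (marks ++ [mark''.items])
      else
        gziLoop rest (num + 1) flag mark marks := rfl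

-- combined loop invariant, for both flag values, by strong induction on the suffix length
theorem gzi_invariant (N : Nat) : ∀ (l : List Int), l.length = N →
    (∀ (i : Int) (mark : PySem.Dict String Int) (marks : List (List (String × Int))),
       gziFinish (i + l.length) (gziLoop l i false mark marks) = marks ++ gziScan l i) ∧
    (∀ (i b : Int) (marks : List (List (String × Int))),
       gziFinish (i + l.length) (gziLoop l i true (PySem.Dict.ofList [("begin", b)]) marks)
         = marks ++ [("begin", b), ("end", i + ((gziZrun l).1 : Int)),
                      ("count", i + ((gziZrun l).1 : Int) - b)] ::
             gziScan (gziZrun l).2 (i + ((gziZrun l).1 : Int))) := by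
  induction N using Nat.strong_induction_on with
  | _ N ih =>
    intro l hl
    constructor
    · intro i mark marks
      match l, hl with
      | [], hl => simp [gziLoop, gziFinish, gziScan]
      | x :: xs, hl =>
        have hxs : xs.length < N := by simp at hl; omega
        have hn : i + ((x :: xs).length : Int) = (i + 1) + (xs.length : Int) := by
          push_cast [List.length_cons]; ring
        rw [gziLoop_cons, hn]
        by_cases hx : x = 0
        · rw [if_pos ⟨hx, rfl⟩]
          rw [((ih xs.length hxs) xs rfl).2]
          rw [gziScan]
          simp only [dif_pos hx, gziZrun, if_pos hx]
          push_cast; ring_nf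
        · rw [if_neg (by simp [hx]), if_neg (by simp), ((ih xs.length hxs) xs rfl).1]
          rw [gziScan]
          simp [hx]
    · intro i b marks
      match l, hl with
      | [], hl =>
        simp only [gziLoop, gziFinish, if_pos rfl, gziZrun, gziScan]
        rw [gzi_mark_items]
        simp
      | x :: xs, hl =>
        have hxs : xs.length < N := by simp at hl; omega
        have hn : i + ((x :: xs).length : Int) = (i + 1) + (xs.length : Int) := by
          push_cast [List.length_cons]; ring
        rw [gziLoop_cons, hn]
        by_cases hx : x = 0
        · rw [if_neg (by simp), if_neg (by simp [hx])]
          rw [((ih xs.length hxs) xs rfl).2]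
          simp only [gziZrun, if_pos hx]
          push_cast; ring_nf
        · rw [if_neg (by simp [hx]), if_pos ⟨hx, rfl⟩]
          simp only []
          rw [gzi_mark_items, ((ih xs.length hxs) xs rfl).1]
          simp only [gziZrun, if_neg hx]
          rw [gziScan]
          simp [hx]

-- ===== VERDICT (by name: the statement is the Claim_ definition above) =====
theorem get_zero_intervals_spec : Claim_equal_get_zero_intervals := by
  intro array _
  unfold Spec_get_zero_intervals get_zero_intervals_alt
  rw [gziFinish_get]
  have H := ((gzi_invariant array.length) array rfl).1 0 PySem.Dict.empty []
  simpa [PySem.List.len] using H
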